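-- pv_equiv track=rewrite | github.com/mselensky/buildstockbatch | buildstockbatch/sample.py | _com_order_tsvs
-- ===== SOURCE A (Python) =====
-- def _com_order_tsvs(tsv_hash):
--     """
--     This method orders the TSV files to ensure that no TSV is sampled before its dependencies are. It also returns\
--     a has of dependencies which are used in subsequent code to down-select TSVs based on previous sample results.
--     :param tsv_hash: Dictionary structure containing each TSV file as a Pandas DataFrame
--     :return: A dictionary defining each TSVs required inputs, as well as the ordered list of TSV files for sampling
--     """
--     dependency_hash = {}
--     for attr in tsv_hash.keys():
--         dependency_hash[attr] = [item.replace('Dependency=', '') for item in list(tsv_hash[attr]) if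
--                                  'Dependency=' in item]
--     attr_order = []
--     for attr in dependency_hash.keys():
--         if dependency_hash[attr]:
--             attr_order.append(attr)
--     max_iterations = 5
--     while True:
--         for attr in dependency_hash.keys():
--             if attr in attr_order:
--                 continue
--             dependencies_met = True
--             for dependency in dependency_hash[attr]:
--                 if dependency not in attr_order:
--                     dependencies_met = False
--             if dependencies_met:
--                 attr_order.append(attr)
--         if dependency_hash.keys().__len__() == attr_order.__len__():
--             break
--         elif max_iterations > 0:
--             max_iterations -= 1
--         else:
--             raise RuntimeError('Unable to resolve the dependency tree within the set iteration limit')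
--     return dependency_hash, attr_order
-- ===== SOURCE B (Python) =====
-- def _com_order_tsvs(tsv_hash):
--     dependency_hash = {
--         attr: [item.replace('Dependency=', '') for item in cols if 'Dependency=' in item]
--         for attr, cols in tsv_hash.items()
--     }
--     with_deps = [attr for attr, deps in dependency_hash.items() if deps]
--     no_deps = [attr for attr, deps in dependency_hash.items() if not deps]
--     return dependency_hash, with_deps + no_deps
-- ===== Notes on version B (the rewrite author's own statement) =====
-- stated objective: faster
-- what changed: Replaces A's fixpoint while-loop with repeated list-membership scans by a single pass: build the dependency map once, then the order is simply the attrs with dependencies followed by the attrs without, in dict order.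
import Mathlib
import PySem

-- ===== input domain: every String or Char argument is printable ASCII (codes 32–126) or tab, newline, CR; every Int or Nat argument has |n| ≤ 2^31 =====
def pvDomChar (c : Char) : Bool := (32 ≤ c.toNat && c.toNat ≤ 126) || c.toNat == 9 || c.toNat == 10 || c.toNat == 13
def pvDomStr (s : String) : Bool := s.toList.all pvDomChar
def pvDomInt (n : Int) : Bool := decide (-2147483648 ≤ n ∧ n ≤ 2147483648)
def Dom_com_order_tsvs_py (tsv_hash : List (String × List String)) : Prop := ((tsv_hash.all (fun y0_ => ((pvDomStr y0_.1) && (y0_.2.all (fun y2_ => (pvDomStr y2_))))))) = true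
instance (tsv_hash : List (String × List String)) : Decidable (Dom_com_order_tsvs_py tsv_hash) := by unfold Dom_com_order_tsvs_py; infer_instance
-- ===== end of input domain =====

-- B replaces A's bounded while-loop fixpoint (repeated membership scans over attr_order) by a single
-- pass over the dependency map: attrs with dependencies first, then attrs without, in dict order.

-- Shared helper: the list comprehension
-- "[item.replace('Dependency=', '') for item in cols if 'Dependency=' in item]"
-- which appears verbatim in both A and B.
def pvDeps (cols : List String) : List String :=
  (cols.filter (fun item => PySem.Str.isIn "Dependency=" item)).map
    (fun item => PySem.Str.replace item "Dependency=" "")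

-- ===== PORT A =====
-- one iteration of the body of A's "while True" loop (the inner "for attr in dependency_hash.keys()")
def pvPass (dh : PySem.Dict String (List String)) (order : List String) : List String :=
  dh.keys.foldl (fun acc attr =>
    if attr ∈ acc then acc
    else if (dh.getD attr []).foldl (fun met dep => if dep ∈ acc then met else false) true
    then acc ++ [attr] else acc) order

-- A's "while True" loop with its max_iterations counter as fuel
def pvWhile (dh : PySem.Dict String (List String)) : Nat → List String → List String
  | fuel, order =>
    let order' := pvPass dh order
    if dh.keys.length = order'.length then order'
    else match fuel with
      | f+1 => pvWhile dh f order'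
      | 0 => order'  -- Python raises RuntimeError here; the equivalence proof shows the loop
                     -- always breaks on its first iteration, so this branch is never reached

def com_order_tsvs_py (tsv_hash : List (String × List String)) : (List (String × List String)) × List String :=
  let d := PySem.Dict.ofList tsv_hash
  let dependency_hash : PySem.Dict String (List String) :=
    d.keys.foldl (fun h attr => h.insert attr (pvDeps (d.getD attr []))) PySem.Dict.empty
  let attr_order : List String :=
    dependency_hash.keys.foldl
      (fun acc attr => if dependency_hash.getD attr [] ≠ [] then acc ++ [attr] else acc) []
  (dependency_hash.items, pvWhile dependency_hash 5 attr_order)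

-- ===== PORT B =====
def com_order_tsvs_py_alt (tsv_hash : List (String × List String)) : (List (String × List String)) × List String :=
  let dependency_hash : List (String × List String) :=
    (PySem.Dict.ofList tsv_hash).items.map (fun p => (p.1, pvDeps p.2))
  let with_deps := (dependency_hash.filter (fun p => !p.2.isEmpty)).map (·.1)
  let no_deps := (dependency_hash.filter (fun p => p.2.isEmpty)).map (·.1)
  (dependency_hash, with_deps ++ no_deps)

-- ===== PRECONDITION & SPEC =====
def Spec_com_order_tsvs_py (tsv_hash : List (String × List String)) (out : (List (String × List String)) × List String) : Prop := out = com_order_tsvs_py_alt tsv_hash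
instance (tsv_hash : List (String × List String)) (out : (List (String × List String)) × List String) : Decidable (Spec_com_order_tsvs_py tsv_hash out) := by unfold Spec_com_order_tsvs_py; infer_instance

-- ===== CLAIM (what is proved, stated in full; the proofs are below) =====
def Claim_equal_com_order_tsvs_py : Prop := ∀ (tsv_hash : List (String × List String)), Dom_com_order_tsvs_py tsv_hash → Spec_com_order_tsvs_py tsv_hash (com_order_tsvs_py tsv_hash)

-- ===== LEMMAS AND PROOFS =====

-- A's first "for attr in dependency_hash.keys()" loop, rewritten over the items list m.
lemma pvInit_eq (m : List (String × List String)) :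
    m.foldl (fun acc p => if p.2 ≠ [] then acc ++ [p.1] else acc) [] =
    (m.filter (fun p => !p.2.isEmpty)).map (·.1) := by
  rw [PySem.List.foldl_append_ite (fun p => p.2 ≠ []) (·.1) m []]
  simp only [List.nil_append]
  congr 1
  apply List.filter_congr
  intro p _
  cases p.2 <;> simp

-- One pass of A's while-loop over the items list m, started from an accumulator that already
-- contains exactly the attrs with dependencies: it appends the dependency-free attrs in order.
lemma pvPass_go (m : List (String × List String)) (acc : List String)
    (hnd : (m.map (·.1)).Nodup)
    (hin : ∀ p ∈ m, p.2 ≠ [] → p.1 ∈ acc)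
    (hout : ∀ p ∈ m, p.2 = [] → p.1 ∉ acc) :
    m.foldl (fun acc p =>
      if p.1 ∈ acc then acc
      else if p.2.foldl (fun met dep => if dep ∈ acc then met else false) true
      then acc ++ [p.1] else acc) acc =
    acc ++ (m.filter (fun p => p.2.isEmpty)).map (·.1) := by
  induction m generalizing acc with
  | nil => simp
  | cons p t ih =>
    obtain ⟨a, ds⟩ := p
    simp only [List.map_cons, List.nodup_cons] at hnd
    by_cases hds : ds = []
    -- a has no dependencies: not yet in acc, dependencies vacuously met, appended
    · subst hds
      have hmem : a ∉ acc := hout (a, []) (by simp) rfl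
      simp only [List.foldl_cons, List.foldl_nil, List.filter_cons, List.isEmpty_nil,
        List.map_cons, if_neg hmem, if_true]
      rw [ih (acc ++ [a]) hnd.2
        (fun q hq hq2 => List.mem_append_left _ (hin q (List.mem_cons_of_mem _ hq) hq2))]
      · simp
      · intro q hq hq2 hq3
        rcases List.mem_append.mp hq3 with h | h
        · exact hout q (List.mem_cons_of_mem _ hq) hq2 h
        · exact hnd.1 ((List.mem_singleton.mp h) ▸ List.mem_map_of_mem hq)
    -- a has dependencies: it is already in acc, the pass skips it
    · have hmem : a ∈ acc := hin (a, ds) (by simp) hds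
      have hne : ds.isEmpty = false := by cases ds <;> simp_all
      simp only [List.foldl_cons, List.filter_cons, hne, if_pos hmem, Bool.false_eq_true,
        if_false]
      exact ih acc hnd.2
        (fun q hq => hin q (List.mem_cons_of_mem _ hq))
        (fun q hq => hout q (List.mem_cons_of_mem _ hq))

-- ===== VERDICT (by name: the statement is the Claim_ definition above) =====
theorem com_order_tsvs_py_spec : Claim_equal_com_order_tsvs_py := by
  intro tsv_hash _
  unfold Spec_com_order_tsvs_py com_order_tsvs_py com_order_tsvs_py_alt
  set d := PySem.Dict.ofList tsv_hash with hd
  set m : List (String × List String) := d.items.map (fun p => (p.1, pvDeps p.2)) with hm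
  have hkd : d.keys.Nodup := PySem.Dict.nodup_keys_ofList tsv_hash
  have hkeys : d.keys = d.items.map (·.1) := rfl
  -- Step 1: the dependency_hash built by A has items m
  have hitems :
      (d.keys.foldl (fun h attr => h.insert attr (pvDeps (d.getD attr []))) PySem.Dict.empty).items
        = m := by
    have h1 := PySem.Dict.items_foldl_insert_fresh d.keys id (fun a => pvDeps (d.getD a []))
      PySem.Dict.empty (fun a _ => PySem.Dict.contains_empty a) (by simpa using hkd)
    simp only [id] at h1
    rw [h1]
    have he : (PySem.Dict.empty : PySem.Dict String (List String)).items = [] := rfl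
    rw [he, List.nil_append, hm, hkeys, List.map_map]
    apply List.map_congr_left
    intro p hp
    simp only [Function.comp]
    rw [PySem.Dict.getD_of_mem_items d (show (p.1, p.2) ∈ d.items from hp) hkd]
  set dh := d.keys.foldl (fun h attr => h.insert attr (pvDeps (d.getD attr []))) PySem.Dict.empty with hdh
  have hkm : dh.keys = m.map (·.1) := by
    show dh.items.map (·.1) = m.map (·.1)
    rw [hitems]
  have hmfst : m.map (·.1) = d.keys := by
    rw [hm, hkeys, List.map_map]; rfl
  have hndm : (m.map (·.1)).Nodup := hmfst ▸ hkd
  have hget : ∀ p ∈ m, dh.getD p.1 [] = p.2 := by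
    intro p hp
    exact PySem.Dict.getD_of_mem_items dh (show (p.1, p.2) ∈ dh.items from hitems ▸ hp)
      (by rw [show dh.keys = dh.items.map (·.1) from rfl, hitems]; exact hndm) []
  set W := (m.filter (fun p => !p.2.isEmpty)).map (·.1) with hW
  set N := (m.filter (fun p => p.2.isEmpty)).map (·.1) with hN
  -- Step 2: A's first loop collects exactly the attrs with dependencies
  have hinit :
      dh.keys.foldl (fun acc attr => if dh.getD attr [] ≠ [] then acc ++ [attr] else acc) []
        = W := by
    rw [hkm, List.foldl_map,
      PySem.List.foldl_congr_mem m _ (fun acc p => if p.2 ≠ [] then acc ++ [p.1] else acc) []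
        (by intro acc p hp; rw [hget p hp]),
      pvInit_eq]
  -- Step 3: the first pass of the while-loop appends the dependency-free attrs and the loop breaks
  have hpass : pvPass dh W = W ++ N := by
    unfold pvPass
    rw [hkm, List.foldl_map,
      PySem.List.foldl_congr_mem m _ (fun acc p =>
        if p.1 ∈ acc then acc
        else if p.2.foldl (fun met dep => if dep ∈ acc then met else false) true
        then acc ++ [p.1] else acc) W
        (by intro acc p hp; rw [hget p hp])]
    apply pvPass_go m W hndm
    · intro p hp hp2
      have : p ∈ m.filter (fun p => !p.2.isEmpty) :=
        List.mem_filter.mpr ⟨hp, by cases h2 : p.2 <;> simp_all⟩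
      exact hW ▸ List.mem_map_of_mem this
    · intro p hp hp2 hmem
      rw [hW, List.mem_map] at hmem
      obtain ⟨q, hq, hq1⟩ := hmem
      rw [List.mem_filter] at hq
      have : q = p := List.inj_on_of_nodup_map hndm hq.1 hp hq1
      subst this
      simp [hp2] at hq
  have hlen : dh.keys.length = (W ++ N).length := by
    rw [hkm, List.length_map, List.length_append, hW, hN, List.length_map, List.length_map]
    have h := List.length_eq_length_filter_add (l := m) (fun p => !p.2.isEmpty)
    simpa [hm] using h
  have hwhile : pvWhile dh 5 W = W ++ N := by
    unfold pvWhile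
    rw [hpass, if_pos hlen]
  show (dh.items,
      pvWhile dh 5
        (dh.keys.foldl (fun acc attr => if dh.getD attr [] ≠ [] then acc ++ [attr] else acc) []))
    = (m, W ++ N)
  rw [hitems, hinit, hwhile]
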